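-- pv_equiv track=rewrite | github.com/DanilkaFish/Updated_TT | Tree/permut.py | perm1
-- ===== SOURCE A (Python) =====
-- def perm1(init, flag=False):
--     if flag:
--         # k = 1
--         # o = -1
--         # a = init[-1][k]
--         # for i in range(len(init) - 1, 0, -1):
--         #     init[i][k] = init[i + o][k]
--         # init[0][k] = a
--         k = 1
--         o = 1
--         a = init[0][k]
--         for i in range(len(init) - 1):
--             init[i][k] = init[i + o][k]
--         init[-1][k] = a
--     else:
--         k = 0
--         o = 1
--         a = init[0][k]
--         for i in range(len(init) - 1):
--             init[i][k] = init[i + o][k]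
--         init[-1][k] = a
--     return init
-- ===== SOURCE B (Python) =====
-- def perm1(init, flag=False):
--     k = 1 if flag else 0
--     col = [row[k] for row in init]
--     rotated = col[1:] + [col[0]]
--     for row, v in zip(init, rotated):
--         row[k] = v
--     return init
-- ===== Notes on version B (the rewrite author's own statement) =====
-- stated objective: simpler
-- what changed: Replaces A's duplicated branch bodies and in-place index-shifting loop over init[i][k]=init[i+1][k] with a single extract/rotate/write-back decomposition: read column k out as a list, rotate it by one, and zip it back into the rows.
import Mathlib
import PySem

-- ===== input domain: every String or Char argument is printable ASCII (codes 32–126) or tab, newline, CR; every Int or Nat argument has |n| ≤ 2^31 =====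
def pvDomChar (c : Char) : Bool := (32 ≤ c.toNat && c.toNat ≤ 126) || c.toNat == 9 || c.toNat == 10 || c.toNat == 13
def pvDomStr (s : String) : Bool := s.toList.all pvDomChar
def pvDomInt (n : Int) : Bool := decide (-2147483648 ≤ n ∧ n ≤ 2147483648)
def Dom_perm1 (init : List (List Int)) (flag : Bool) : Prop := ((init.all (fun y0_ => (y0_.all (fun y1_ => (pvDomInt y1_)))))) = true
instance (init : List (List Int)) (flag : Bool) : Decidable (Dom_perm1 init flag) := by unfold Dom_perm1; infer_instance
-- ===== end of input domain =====

-- B rewrites A's duplicated in-place shifting loop as extract column / rotate / write back (objective: simpler).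
-- Both Pythons mutate `init`'s rows in place; the theorems are about the RETURN value (on ragged rows, outside Pre_,
-- A can partially mutate before raising while B raises before any write).

-- ===== PORT A =====
-- xs[i] = v for a possibly negative index i; exact for in-range i (Python raises IndexError out of range; excluded by Pre_)
def pySetA (xs : List (List Int)) (i : Int) (v : List Int) : List (List Int) :=
  let j : Int := if i < 0 then (xs.length : Int) + i else i
  if 0 ≤ j then xs.set j.toNat v else xs

-- row[k] = v for index k ≥ 0; exact for in-range k (IndexError excluded by Pre_)
def pySetR (xs : List Int) (k : Int) (v : Int) : List Int :=
  if 0 ≤ k then xs.set k.toNat v else xs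

-- rows[i][k]
def colGet (rows : List (List Int)) (i : Int) (k : Int) : Int :=
  PySem.List.pyGetD (PySem.List.pyGetD rows i []) k 0

-- rows[i][k] = v
def rowSet (rows : List (List Int)) (i : Int) (k : Int) (v : Int) : List (List Int) :=
  pySetA rows i (pySetR (PySem.List.pyGetD rows i []) k v)

def perm1 (init : List (List Int)) (flag : Bool) : List (List Int) :=
  if flag then
    let k : Int := 1
    let a := colGet init 0 k
    let st := (PySem.List.pyRange 0 ((init.length : Int) - 1) 1).foldl
      (fun acc i => rowSet acc i k (colGet acc (i + 1) k)) init
    rowSet st (-1) k a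
  else
    let k : Int := 0
    let a := colGet init 0 k
    let st := (PySem.List.pyRange 0 ((init.length : Int) - 1) 1).foldl
      (fun acc i => rowSet acc i k (colGet acc (i + 1) k)) init
    rowSet st (-1) k a

-- ===== PORT B =====
def perm1_alt (init : List (List Int)) (flag : Bool) : List (List Int) :=
  let k : Int := if flag then 1 else 0
  let col := init.map (fun row => PySem.List.pyGetD row k 0)
  let rotated := PySem.List.slice col (some 1) none ++ [PySem.List.pyGetD col 0 0]
  (init.zip rotated).map (fun rv => pySetR rv.1 k rv.2)

-- ===== PRECONDITION & SPEC =====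
-- Pre_ is exactly where the Python A returns: a nonempty matrix whose every row has column k (= 1 if flag else 0);
-- otherwise A raises IndexError.
def Pre_perm1 (init : List (List Int)) (flag : Bool) : Prop :=
  init ≠ [] ∧ ∀ row ∈ init, (if flag then 1 else 0) < row.length
instance (init : List (List Int)) (flag : Bool) : Decidable (Pre_perm1 init flag) := by
  unfold Pre_perm1; infer_instance

def pvWitness_perm1 : List (List Int) × Bool := ([[1, 2], [3, 4], [5, 6]], true)

def Spec_perm1 (init : List (List Int)) (flag : Bool) (out : List (List Int)) : Prop := out = perm1_alt init flag
instance (init : List (List Int)) (flag : Bool) (out : List (List Int)) : Decidable (Spec_perm1 init flag out) := by unfold Spec_perm1; infer_instance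

-- ===== CLAIM (what is proved, stated in full; the proofs are below) =====
def Claim_equal_perm1 : Prop := ∀ (init : List (List Int)) (flag : Bool), Dom_perm1 init flag → Pre_perm1 init flag → Spec_perm1 init flag (perm1 init flag)

-- ===== LEMMAS AND PROOFS =====

theorem length_pySetA (xs : List (List Int)) (i : Int) (v : List Int) :
    (pySetA xs i v).length = xs.length := by
  unfold pySetA
  dsimp only
  split <;> split <;> first | exact List.length_set | rfl

theorem length_foldl_rowSet (l : List Int) (init : List (List Int)) (k : Int) :
    (l.foldl (fun acc i => rowSet acc i k (colGet acc (i + 1) k)) init).length = init.length := by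
  induction l generalizing init with
  | nil => rfl
  | cons x xs ihl =>
    simp only [List.foldl_cons]
    rw [ihl]
    unfold rowSet
    exact length_pySetA _ _ _

theorem getElem?_pySetA_of_nonneg (xs : List (List Int)) (i : Int) (v : List Int)
    (h0 : 0 ≤ i) (hlt : i.toNat < xs.length) (j : Nat) :
    (pySetA xs i v)[j]? = if (j : Int) = i then some v else xs[j]? := by
  unfold pySetA
  simp only [if_neg (by omega : ¬ i < 0), if_pos h0, List.getElem?_set]
  by_cases h : i.toNat = j
  · rw [if_pos h, if_pos (by omega), if_pos (by omega)]
  · rw [if_neg h, if_neg (by omega)]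

theorem getElem?_pySetA_neg_one (xs : List (List Int)) (v : List Int) (hne : xs ≠ []) (j : Nat) :
    (pySetA xs (-1) v)[j]? = if j = xs.length - 1 then some v else xs[j]? := by
  unfold pySetA
  have hx : 0 < xs.length := List.length_pos_iff.mpr hne
  simp only [if_pos (by omega : (-1 : Int) < 0),
    if_pos (by omega : (0:Int) ≤ (xs.length : Int) + (-1)), List.getElem?_set]
  have ht : ((xs.length : Int) + (-1)).toNat = xs.length - 1 := by omega
  rw [ht]
  by_cases h : xs.length - 1 = j
  · rw [if_pos h, if_pos (by omega), if_pos (by omega)]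
  · rw [if_neg h, if_neg (by omega)]

-- invariant of A's shifting loop: after the first m steps, rows before m hold their successor's column value
theorem perm1_loop_inv (init : List (List Int)) (k : Int) (m : Nat) (hm : m + 1 ≤ init.length) :
    (∀ j : Nat,
      ((PySem.List.pyRange 0 (m : Int) 1).foldl
          (fun acc i => rowSet acc i k (colGet acc (i + 1) k)) init)[j]? =
        if j < m then some (pySetR (init.getD j []) k (colGet init ((j : Int) + 1) k))
        else init[j]?) := by
  induction m with
  | zero =>
    intro j
    simp [PySem.List.pyRange_one_eq_nil (a := 0) (b := 0) le_rfl]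
  | succ m ih =>
    have ih' := ih (by omega)
    intro j
    have hsplit : PySem.List.pyRange 0 ((m + 1 : Nat) : Int) 1 =
        PySem.List.pyRange 0 (m : Int) 1 ++ [(m : Int)] := by
      have := PySem.List.pyRange_one_succ_right (a := 0) (b := (m : Int)) (by omega)
      push_cast
      simpa using this
    rw [hsplit, List.foldl_append]
    set acc := (PySem.List.pyRange 0 (m : Int) 1).foldl
        (fun acc i => rowSet acc i k (colGet acc (i + 1) k)) init with hacc
    simp only [List.foldl_cons, List.foldl_nil]
    have hlen : acc.length = init.length := length_foldl_rowSet _ _ _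
    have haccm : PySem.List.pyGetD acc ((m : Nat) : Int) [] = init.getD m [] := by
      rw [PySem.List.pyGetD_natCast]
      have h := ih' m
      rw [if_neg (by omega : ¬ m < m)] at h
      simp only [List.getD, ← h]
    have haccm1 : PySem.List.pyGetD acc (((m : Nat) : Int) + 1) []
        = PySem.List.pyGetD init (((m : Nat) : Int) + 1) [] := by
      have hc : (((m : Nat) : Int) + 1) = (((m + 1 : Nat)) : Int) := by push_cast; ring
      rw [hc, PySem.List.pyGetD_natCast, PySem.List.pyGetD_natCast]
      have h := ih' (m + 1)
      rw [if_neg (by omega : ¬ m + 1 < m)] at h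
      simp only [List.getD, ← h]
    conv_lhs => unfold rowSet colGet
    rw [haccm1, haccm]
    rw [getElem?_pySetA_of_nonneg _ _ _ (by omega : (0:Int) ≤ (m : Int)) (by omega) j]
    by_cases hj : (j : Int) = (m : Int)
    · have hjm : j = m := by exact_mod_cast hj
      subst hjm
      rw [if_pos rfl, if_pos (by omega)]
      rfl
    · have hjm : j ≠ m := by intro h; exact hj (by exact_mod_cast h)
      rw [if_neg hj, ih' j]
      by_cases h1 : j < m
      · rw [if_pos h1, if_pos (by omega)]
      · rw [if_neg h1, if_neg (by omega)]

-- the shared core: for either column index k, A's loop result equals B's zip/rotate result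
theorem perm1_core (init : List (List Int)) (k : Int) (hne : init ≠ []) :
    rowSet ((PySem.List.pyRange 0 ((init.length : Int) - 1) 1).foldl
        (fun acc i => rowSet acc i k (colGet acc (i + 1) k)) init) (-1) k (colGet init 0 k) =
      (init.zip (PySem.List.slice (init.map (fun row => PySem.List.pyGetD row k 0)) (some 1) none ++
          [PySem.List.pyGetD (init.map (fun row => PySem.List.pyGetD row k 0)) 0 0])).map
        (fun rv => pySetR rv.1 k rv.2) := by
  have hx : 0 < init.length := List.length_pos_iff.mpr hne
  set n := init.length with hn
  have hcast : ((n : Int) - 1) = ((n - 1 : Nat) : Int) := by omega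
  rw [hcast]
  set acc := (PySem.List.pyRange 0 ((n - 1 : Nat) : Int) 1).foldl
      (fun acc i => rowSet acc i k (colGet acc (i + 1) k)) init with hacc
  have hinv := perm1_loop_inv init k (n - 1) (by omega)
  rw [← hacc] at hinv
  have hlen : acc.length = n := length_foldl_rowSet _ _ _
  have haccne : acc ≠ [] := by
    intro h; rw [h] at hlen; simp at hlen; omega
  have haccl : PySem.List.pyGetD acc (-1) [] = init.getD (n - 1) [] := by
    rw [PySem.List.pyGetD_neg_one _ _ haccne]
    have h := hinv (n - 1)
    rw [if_neg (by omega : ¬ n - 1 < n - 1)] at h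
    apply Option.some_inj.mp
    have hsl : some (acc.getLast haccne) = acc[acc.length - 1]? := by
      rw [List.getLast_eq_getElem]
      exact (List.getElem?_eq_getElem _).symm
    rw [hsl, hlen, h]
    simp [List.getD, List.getElem?_eq_getElem (show n - 1 < init.length by omega)]
  set col := init.map (fun row => PySem.List.pyGetD row k 0) with hcoldef
  have hcol : col.length = n := by simp [hcoldef, hn]
  have hslice : PySem.List.slice col (some 1) none = col.drop 1 := by
    have := PySem.List.slice_from col (a := 1) (by omega)
    simpa using this
  rw [hslice]
  set rot := col.drop 1 ++ [PySem.List.pyGetD col 0 0] with hrotdef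
  have hrot : rot.length = n := by
    rw [hrotdef]
    simp [hcol]
    omega
  conv_lhs => unfold rowSet colGet
  rw [haccl]
  apply List.ext_getElem?
  intro j
  rw [getElem?_pySetA_neg_one _ _ haccne j, hlen]
  by_cases hj : j < n
  · rw [List.getElem?_map]
    have hzl : (init.zip rot).length = n := by simp [hrot, hn]
    have hzj : (init.zip rot)[j]? = some (init[j]'(by omega), rot[j]'(by omega)) := by
      rw [List.getElem?_eq_getElem (by omega), List.getElem_zip]
    rw [hzj, Option.map_some]
    by_cases hlast : j = n - 1
    · subst hlast
      rw [if_pos rfl]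
      have hrOpt : rot[n-1]? = some (PySem.List.pyGetD col 0 0) := by
        rw [hrotdef, List.getElem?_append_right (by simp [hcol])]
        simp [hcol]
      have hrv : rot[n-1]'(by omega) = PySem.List.pyGetD col 0 0 := by
        apply Option.some_inj.mp
        rw [← List.getElem?_eq_getElem]
        exact hrOpt
      rw [hrv]
      have hgd : init.getD (n - 1) [] = init[n-1]'(by omega) := by
        simp [List.getD, List.getElem?_eq_getElem (show n - 1 < init.length by omega)]
      rw [hgd]
      have hc0 : col[0]? = some (PySem.List.pyGetD (init[0]'(by omega)) k 0) := by
        rw [hcoldef, List.getElem?_map,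
          List.getElem?_eq_getElem (show 0 < init.length by omega), Option.map_some]
      have hcv : PySem.List.pyGetD col 0 0 = PySem.List.pyGetD (init[0]'(by omega)) k 0 := by
        rw [PySem.List.pyGetD_zero]
        simp [List.getD, hc0]
      rw [hcv]
      have ha : PySem.List.pyGetD init 0 [] = init[0]'(by omega) := by
        rw [PySem.List.pyGetD_zero]
        simp [List.getD, List.getElem?_eq_getElem (show 0 < init.length by omega)]
      rw [ha]
    · rw [if_neg hlast]
      have h := hinv j
      rw [if_pos (by omega)] at h
      rw [h]
      have hgd : init.getD j [] = init[j]'(by omega) := by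
        simp [List.getD, List.getElem?_eq_getElem (show j < init.length by omega)]
      have hrOpt : rot[j]? = some (col[j+1]'(by omega)) := by
        rw [hrotdef, List.getElem?_append_left (by simp [hcol]; omega), List.getElem?_drop]
        rw [List.getElem?_eq_getElem (show 1 + j < col.length by omega)]
        congr 1
        congr 1
        omega
      have hrv : rot[j]'(by omega) = col[j+1]'(by omega) := by
        apply Option.some_inj.mp
        rw [← List.getElem?_eq_getElem]
        exact hrOpt
      rw [hrv]
      have hcOpt : col[j+1]? = some (PySem.List.pyGetD (init[j+1]'(by omega)) k 0) := by
        rw [hcoldef, List.getElem?_map,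
          List.getElem?_eq_getElem (show j + 1 < init.length by omega), Option.map_some]
      have hcv : col[j+1]'(by omega) = PySem.List.pyGetD (init[j+1]'(by omega)) k 0 := by
        apply Option.some_inj.mp
        rw [← List.getElem?_eq_getElem]
        exact hcOpt
      have hcg : colGet init ((j : Int) + 1) k = PySem.List.pyGetD (init[j+1]'(by omega)) k 0 := by
        unfold colGet
        have hc : (((j : Nat) : Int) + 1) = (((j + 1 : Nat)) : Int) := by push_cast; ring
        rw [hc, PySem.List.pyGetD_natCast]
        congr 1
        simp [List.getD, List.getElem?_eq_getElem (show j + 1 < init.length by omega)]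
      rw [hcv, hgd, hcg]
  · rw [if_neg (by omega)]
    have h := hinv j
    rw [if_neg (by omega)] at h
    rw [h]
    have h1 : init[j]? = none := by
      rw [List.getElem?_eq_none]
      omega
    rw [h1, List.getElem?_map]
    have h2 : (init.zip rot)[j]? = none := by
      rw [List.getElem?_eq_none]
      simp [hrot, hn]
      omega
    rw [h2, Option.map_none]

-- ===== VERDICT (by name: the statement is the Claim_ definition above) =====
theorem perm1_spec : Claim_equal_perm1 := by
  intro init flag _ hpre
  unfold Spec_perm1 perm1 perm1_alt
  cases flag
  · simp only [Bool.false_eq_true, if_false]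
    exact perm1_core init 0 hpre.1
  · simp only [if_true]
    exact perm1_core init 1 hpre.1
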